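-- pv_equiv track=rewrite | github.com/Vamshi192004/kasparro-ai-agentic-content-generation-system-Vamshi-Krishna-Yadav-S-M | src/core/logic_blocks.py | generate_benefits_block
-- ===== SOURCE A (Python) =====
-- def generate_benefits_block(features):
--     """
--     Transforms features into benefits.
--     Example: "Vitamin C" -> "Brightens skin" (Simulated logic)
--     """
--     benefits = []
--     for feature in features:
--         if "Vitamin C" in feature:
--             benefits.append("Brightens and evens skin tone")
--         elif "Hyaluronic" in feature:
--             benefits.append("Deeply hydrates and plumps")
--         elif "SPF" in feature:
--             benefits.append("Protects against UV damage")
--         else: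
--             benefits.append(f"Provides the benefit of {feature}")
--     return benefits
-- ===== SOURCE B (Python) =====
-- def generate_benefits_block(features):
--     # Start with the default benefit everywhere, then sweep the list once per
--     # rule in reverse priority order, overwriting matched slots; the highest
--     # priority rule overwrites last, so it wins (same result as first-match).
--     out = [f"Provides the benefit of {feature}" for feature in features]
--     for key, benefit in (
--         ("SPF", "Protects against UV damage"),
--         ("Hyaluronic", "Deeply hydrates and plumps"),
--         ("Vitamin C", "Brightens and evens skin tone"),
--     ):
--         for i, feature in enumerate(features):
--             if key in feature:
--                 out[i] = benefit
--     return out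
-- ===== Notes on version B (the rewrite author's own statement) =====
-- stated objective: alternative
-- what changed: Instead of classifying each element with one first-match branch chain, B fills the list with defaults and then makes one overwrite sweep over the whole list per rule in reverse priority order, so later (higher-priority) sweeps win.
import Mathlib
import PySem

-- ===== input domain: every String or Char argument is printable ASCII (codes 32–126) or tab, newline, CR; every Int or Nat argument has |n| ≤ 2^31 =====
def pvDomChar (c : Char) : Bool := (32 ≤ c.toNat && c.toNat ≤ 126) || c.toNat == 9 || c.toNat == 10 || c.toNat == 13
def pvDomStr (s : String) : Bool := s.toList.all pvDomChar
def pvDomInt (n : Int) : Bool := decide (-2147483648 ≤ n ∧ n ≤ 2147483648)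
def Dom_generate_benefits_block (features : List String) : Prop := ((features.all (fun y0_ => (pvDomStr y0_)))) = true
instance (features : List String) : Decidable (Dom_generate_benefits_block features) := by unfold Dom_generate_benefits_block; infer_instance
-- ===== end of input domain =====

-- B replaces A's per-element first-match branch chain by staged whole-list overwrite sweeps,
-- one per rule in reverse priority order (alternative decomposition; same cost).
-- ===== PORT A =====
def generate_benefits_block (features : List String) : List String :=
  features.foldl (fun benefits feature =>
    if PySem.Str.isIn "Vitamin C" feature then benefits ++ ["Brightens and evens skin tone"]
    else if PySem.Str.isIn "Hyaluronic" feature then benefits ++ ["Deeply hydrates and plumps"]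
    else if PySem.Str.isIn "SPF" feature then benefits ++ ["Protects against UV damage"]
    else benefits ++ ["Provides the benefit of " ++ feature]) []

-- ===== PORT B =====
-- One sweep: overwrite out[i] with b wherever key occurs in features[i]
def pvSweep (key b : String) (features out : List String) : List String :=
  (features.zip out).map (fun p => if PySem.Str.isIn key p.1 then b else p.2)

def generate_benefits_block_alt (features : List String) : List String :=
  let out0 := features.map (fun feature => "Provides the benefit of " ++ feature)
  let out1 := pvSweep "SPF" "Protects against UV damage" features out0
  let out2 := pvSweep "Hyaluronic" "Deeply hydrates and plumps" features out1
  pvSweep "Vitamin C" "Brightens and evens skin tone" features out2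

-- ===== PRECONDITION & SPEC =====
def Spec_generate_benefits_block (features : List String) (out : List String) : Prop := out = generate_benefits_block_alt features
instance (features : List String) (out : List String) : Decidable (Spec_generate_benefits_block features out) := by unfold Spec_generate_benefits_block; infer_instance

-- ===== CLAIM (what is proved, stated in full; the proofs are below) =====
def Claim_equal_generate_benefits_block : Prop := ∀ (features : List String), Dom_generate_benefits_block features → Spec_generate_benefits_block features (generate_benefits_block features)

-- ===== LEMMAS AND PROOFS =====
-- A's per-element classification
def pvAFun (feature : String) : String :=
  if PySem.Str.isIn "Vitamin C" feature then "Brightens and evens skin tone"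
  else if PySem.Str.isIn "Hyaluronic" feature then "Deeply hydrates and plumps"
  else if PySem.Str.isIn "SPF" feature then "Protects against UV damage"
  else "Provides the benefit of " ++ feature

theorem pv_foldl_map (f : String → String) (features : List String) (acc : List String) :
    features.foldl (fun benefits feature => benefits ++ [f feature]) acc
      = acc ++ features.map f := by
  induction features generalizing acc with
  | nil => simp
  | cons x xs ih => simp [ih]

theorem pv_alt_eq_map (features : List String) :
    generate_benefits_block_alt features = features.map pvAFun := by
  induction features with
  | nil => rfl
  | cons x xs ih =>
    simp only [generate_benefits_block_alt, pvSweep, List.map_cons, List.zip_cons_cons,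
      pvAFun] at ih ⊢
    rw [List.cons.injEq]
    constructor
    · split_ifs <;> rfl
    · exact ih

-- ===== VERDICT (by name: the statement is the Claim_ definition above) =====
theorem generate_benefits_block_spec : Claim_equal_generate_benefits_block := by
  intro features _
  unfold Spec_generate_benefits_block generate_benefits_block
  have : (fun (benefits : List String) (feature : String) =>
      if PySem.Str.isIn "Vitamin C" feature then benefits ++ ["Brightens and evens skin tone"]
      else if PySem.Str.isIn "Hyaluronic" feature then benefits ++ ["Deeply hydrates and plumps"]
      else if PySem.Str.isIn "SPF" feature then benefits ++ ["Protects against UV damage"]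
      else benefits ++ ["Provides the benefit of " ++ feature])
      = (fun (benefits : List String) (feature : String) => benefits ++ [pvAFun feature]) := by
    funext benefits feature
    simp only [pvAFun]
    split_ifs <;> rfl
  rw [this, pv_foldl_map, pv_alt_eq_map]
  simp
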